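-- pv_equiv track=rewrite | github.com/SolitudeZY/QuickModel | app/tools.py | _build_engine_order
-- ===== SOURCE A (Python) =====
-- _ENGINE_PRIORITY = ["tavily", "bing", "google", "searxng", "duckduckgo"]
--
-- def _engine_available(eng: str, api_keys: dict) -> bool:
--     """Check if an engine has the required credentials configured."""
--     if eng == "duckduckgo":
--         return True
--     if eng == "tavily":
--         return bool(api_keys.get("tavily_api_key"))
--     if eng == "bing":
--         return bool(api_keys.get("bing_api_key"))
--     if eng == "google":
--         return bool(api_keys.get("google_api_key")) and bool(api_keys.get("google_cx"))
--     if eng == "searxng":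
--         return bool(api_keys.get("searxng_url"))
--     return False
--
-- def _build_engine_order(preferred: str, api_keys: dict) -> list[str]:
--     """Build fallback order: preferred first, then others with keys, DuckDuckGo last."""
--     order = []
--     if preferred and _engine_available(preferred, api_keys):
--         order.append(preferred)
--     for eng in _ENGINE_PRIORITY:
--         if eng not in order and _engine_available(eng, api_keys):
--             order.append(eng)
--     if "duckduckgo" not in order:
--         order.append("duckduckgo")
--     return order
-- ===== SOURCE B (Python) =====
-- # B: scans the api_keys dict (not the engine list): tallies satisfied credentials per
-- # engine via a key->engine map, keeps engines meeting their quota, then sorts by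
-- # (is-not-the-preferred-engine, priority rank).
-- _ENGINE_PRIORITY = ["tavily", "bing", "google", "searxng", "duckduckgo"]
-- _KEY_TO_ENGINE = {"tavily_api_key": "tavily", "bing_api_key": "bing",
--                   "google_api_key": "google", "google_cx": "google",
--                   "searxng_url": "searxng"}
-- _NEED = {"tavily": 1, "bing": 1, "google": 2, "searxng": 1, "duckduckgo": 0}
--
-- def _build_engine_order(preferred: str, api_keys: dict) -> list[str]:
--     hits = [_KEY_TO_ENGINE[k] for k, v in api_keys.items() if v and k in _KEY_TO_ENGINE]
--     avail = [e for e, n in _NEED.items() if hits.count(e) >= n]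
--     return sorted(avail, key=lambda e: (not (preferred and e == preferred),
--                                         _ENGINE_PRIORITY.index(e)))
-- ===== Notes on version B (the rewrite author's own statement) =====
-- stated objective: alternative
-- what changed: B inverts the traversal: instead of scanning the engine list and querying the dict per engine, it scans the api_keys dict once, tallies satisfied credentials per engine through a key->engine map, keeps engines meeting their quota, and orders the result with a single key-based sort (is-not-preferred, priority rank).
import Mathlib
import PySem

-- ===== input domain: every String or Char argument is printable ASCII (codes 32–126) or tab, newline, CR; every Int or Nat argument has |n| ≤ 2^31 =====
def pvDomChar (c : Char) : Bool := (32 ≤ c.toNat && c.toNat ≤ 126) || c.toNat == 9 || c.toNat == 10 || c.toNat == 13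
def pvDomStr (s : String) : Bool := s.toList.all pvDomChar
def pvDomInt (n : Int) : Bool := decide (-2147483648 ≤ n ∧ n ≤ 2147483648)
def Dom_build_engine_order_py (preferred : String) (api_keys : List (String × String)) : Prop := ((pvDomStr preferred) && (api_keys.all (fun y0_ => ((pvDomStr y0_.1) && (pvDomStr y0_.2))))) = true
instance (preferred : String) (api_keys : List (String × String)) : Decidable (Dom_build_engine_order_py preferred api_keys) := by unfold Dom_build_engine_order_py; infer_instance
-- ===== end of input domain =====

-- B scans the api_keys dict instead of the engine list: it tallies satisfied credentials
-- per engine through a key->engine map and then sorts the qualifying engines by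
-- (is-not-the-preferred-engine, priority rank); equivalent to A (objective: alternative).

-- ===== PORT A =====
def enginePriority : List String := ["tavily", "bing", "google", "searxng", "duckduckgo"]

-- bool(api_keys.get(k)) for a str-valued dict: present and non-empty
def keyTruthy (api_keys : List (String × String)) (k : String) : Bool :=
  match (PySem.Dict.mk api_keys).get? k with
  | none => false
  | some s => s ≠ ""

def engine_available (eng : String) (api_keys : List (String × String)) : Bool :=
  if eng = "duckduckgo" then true
  else if eng = "tavily" then keyTruthy api_keys "tavily_api_key"
  else if eng = "bing" then keyTruthy api_keys "bing_api_key"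
  else if eng = "google" then keyTruthy api_keys "google_api_key" && keyTruthy api_keys "google_cx"
  else if eng = "searxng" then keyTruthy api_keys "searxng_url"
  else false

def build_engine_order_py (preferred : String) (api_keys : List (String × String)) : List String :=
  let order : List String := []
  let order := if preferred ≠ "" ∧ engine_available preferred api_keys then order ++ [preferred] else order
  let order := enginePriority.foldl
    (fun order eng => if eng ∉ order ∧ engine_available eng api_keys then order ++ [eng] else order) order
  if "duckduckgo" ∈ order then order else order ++ ["duckduckgo"]

-- ===== PORT B =====
def keyToEngine : PySem.Dict String String :=
  PySem.Dict.mk [("tavily_api_key", "tavily"), ("bing_api_key", "bing"),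
    ("google_api_key", "google"), ("google_cx", "google"), ("searxng_url", "searxng")]

def needList : List (String × Int) :=
  [("tavily", 1), ("bing", 1), ("google", 2), ("searxng", 1), ("duckduckgo", 0)]

-- api_keys.items() of the Python dict the association list encodes: first occurrence of
-- each key wins, the same first-match convention as PySem.Dict.get? on that list.
def dictItems : List (String × String) → List String → List (String × String)
  | [], _ => []
  | p :: rest, seen => if seen.contains p.1 then dictItems rest seen
                       else p :: dictItems rest (p.1 :: seen)

-- hits = [_KEY_TO_ENGINE[k] for k, v in api_keys.items() if v and k in _KEY_TO_ENGINE]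
-- (the subscript is guarded by the membership test, so getD's default is never used)
def hitsOf (api_keys : List (String × String)) : List String :=
  ((dictItems api_keys []).filter
      (fun p => p.2 ≠ "" && keyToEngine.contains p.1)).map (fun p => keyToEngine.getD p.1 "")

def build_engine_order_py_alt (preferred : String) (api_keys : List (String × String)) : List String :=
  let hits := hitsOf api_keys
  let avail : List String := (needList.filter (fun p => (hits.count p.1 : Int) ≥ p.2)).map (·.1)
  -- every element of avail is in enginePriority, so .index never raises; getD 0 is unreachable
  PySem.List.sorted2 avail
    (fun e => !(decide (preferred ≠ "") && (e == preferred)))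
    (fun e => (PySem.List.index? enginePriority e).getD 0)

-- ===== PRECONDITION & SPEC =====
def Spec_build_engine_order_py (preferred : String) (api_keys : List (String × String)) (out : List String) : Prop := out = build_engine_order_py_alt preferred api_keys
instance (preferred : String) (api_keys : List (String × String)) (out : List String) : Decidable (Spec_build_engine_order_py preferred api_keys out) := by unfold Spec_build_engine_order_py; infer_instance

-- ===== CLAIM =====
def Claim_equal_build_engine_order_py : Prop := ∀ (preferred : String) (api_keys : List (String × String)), Dom_build_engine_order_py preferred api_keys → Spec_build_engine_order_py preferred api_keys (build_engine_order_py preferred api_keys)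

-- ===== LEMMAS AND PROOFS =====

-- the count of entries for credential key K among the kept (first-per-key) items
def predK (K : String) : String × String → Bool := fun p => p.1 == K && p.2 ≠ ""

theorem countP_dictItems_of_mem (K : String) (l : List (String × String)) (seen : List String)
    (h : K ∈ seen) : (dictItems l seen).countP (predK K) = 0 := by
  induction l generalizing seen with
  | nil => simp [dictItems]
  | cons p rest ih =>
    simp only [dictItems]
    by_cases hc : seen.contains p.1
    · rw [if_pos hc]; exact ih seen h
    · rw [if_neg hc, List.countP_cons]
      have hne : p.1 ≠ K := by
        intro e; exact hc (by simpa using e ▸ h)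
      rw [ih (p.1 :: seen) (List.mem_cons_of_mem _ h)]
      simp [predK, hne]

theorem countP_dictItems (K : String) (l : List (String × String)) (seen : List String)
    (h : K ∉ seen) :
    (dictItems l seen).countP (predK K) = if keyTruthy l K then 1 else 0 := by
  induction l generalizing seen with
  | nil => simp [dictItems, keyTruthy, PySem.Dict.get?]
  | cons p rest ih =>
    obtain ⟨k, v⟩ := p
    have hkt : keyTruthy ((k, v) :: rest) K =
        if k = K then decide (v ≠ "") else keyTruthy rest K := by
      simp only [keyTruthy, PySem.Dict.get?_mk_cons]
      by_cases hk : k = K <;> simp [hk]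
    simp only [dictItems]
    by_cases hc : List.contains seen (k, v).1
    · have hk : k ≠ K := by
        intro e; subst e; exact h (by simpa using hc)
      rw [if_pos hc, ih seen h, hkt, if_neg hk]
    · rw [if_neg hc, List.countP_cons]
      by_cases hk : k = K
      · subst hk
        rw [countP_dictItems_of_mem k rest (k :: seen) (List.mem_cons_self ..), hkt]
        by_cases hv : v = "" <;> simp [predK, hv]
      · have hns : K ∉ k :: seen := by
          intro m
          rcases List.mem_cons.mp m with e | e
          · exact hk e.symm
          · exact h e
        rw [ih (k :: seen) hns, hkt, if_neg hk]
        simp [predK, hk]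

theorem countP_or_disjoint {α : Type} (l : List α) (p q : α → Bool)
    (h : ∀ a, ¬(p a = true ∧ q a = true)) :
    l.countP (fun a => p a || q a) = l.countP p + l.countP q := by
  induction l with
  | nil => simp
  | cons a t ih =>
    have := h a
    cases hp : p a <;> cases hq : q a <;> simp_all <;> omega

-- hitsOf counts as countP of predK on the kept items, per engine
theorem hits_count_eq (l : List (String × String)) (e : String) :
    (hitsOf l).count e = (dictItems l []).countP
      (fun p => (keyToEngine.getD p.1 "" == e) && (p.2 ≠ "" && keyToEngine.contains p.1)) := by
  simp [hitsOf, List.count, List.countP_map, List.countP_filter, Function.comp]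

theorem point_tavily (p : String × String) :
    ((keyToEngine.getD p.1 "" == "tavily") && (decide (p.2 ≠ "") && keyToEngine.contains p.1))
      = predK "tavily_api_key" p := by
  obtain ⟨k, v⟩ := p
  simp only [predK, keyToEngine, PySem.Dict.getD_eq_get?_getD, PySem.Dict.get?_mk_cons,
    PySem.Dict.contains_mk]
  split_ifs <;> simp_all [PySem.Dict.get?] <;> (rintro rfl; simp_all)

theorem point_bing (p : String × String) :
    ((keyToEngine.getD p.1 "" == "bing") && (decide (p.2 ≠ "") && keyToEngine.contains p.1))
      = predK "bing_api_key" p := by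
  obtain ⟨k, v⟩ := p
  simp only [predK, keyToEngine, PySem.Dict.getD_eq_get?_getD, PySem.Dict.get?_mk_cons,
    PySem.Dict.contains_mk]
  split_ifs <;> simp_all [PySem.Dict.get?] <;> (rintro rfl; simp_all)

theorem point_searxng (p : String × String) :
    ((keyToEngine.getD p.1 "" == "searxng") && (decide (p.2 ≠ "") && keyToEngine.contains p.1))
      = predK "searxng_url" p := by
  obtain ⟨k, v⟩ := p
  simp only [predK, keyToEngine, PySem.Dict.getD_eq_get?_getD, PySem.Dict.get?_mk_cons,
    PySem.Dict.contains_mk]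
  split_ifs <;> simp_all [PySem.Dict.get?] <;> (rintro rfl; simp_all)

theorem point_google (p : String × String) :
    ((keyToEngine.getD p.1 "" == "google") && (decide (p.2 ≠ "") && keyToEngine.contains p.1))
      = (predK "google_api_key" p || predK "google_cx" p) := by
  obtain ⟨k, v⟩ := p
  simp only [predK, keyToEngine, PySem.Dict.getD_eq_get?_getD, PySem.Dict.get?_mk_cons,
    PySem.Dict.contains_mk]
  split_ifs <;> simp_all [PySem.Dict.get?] <;> (constructor <;> (rintro rfl; simp_all))

theorem point_duck (p : String × String) :
    ((keyToEngine.getD p.1 "" == "duckduckgo") && (decide (p.2 ≠ "") && keyToEngine.contains p.1))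
      = false := by
  obtain ⟨k, v⟩ := p
  simp only [keyToEngine, PySem.Dict.getD_eq_get?_getD, PySem.Dict.get?_mk_cons,
    PySem.Dict.contains_mk]
  split_ifs <;> simp_all [PySem.Dict.get?]

theorem hits_count_tavily (l : List (String × String)) :
    (hitsOf l).count "tavily" = if keyTruthy l "tavily_api_key" then 1 else 0 := by
  rw [hits_count_eq, List.countP_congr (fun a _ => iff_of_eq (congrArg (· = true) (point_tavily a)))]
  exact countP_dictItems _ _ [] (List.not_mem_nil)

theorem hits_count_bing (l : List (String × String)) :
    (hitsOf l).count "bing" = if keyTruthy l "bing_api_key" then 1 else 0 := by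
  rw [hits_count_eq, List.countP_congr (fun a _ => iff_of_eq (congrArg (· = true) (point_bing a)))]
  exact countP_dictItems _ _ [] (List.not_mem_nil)

theorem hits_count_searxng (l : List (String × String)) :
    (hitsOf l).count "searxng" = if keyTruthy l "searxng_url" then 1 else 0 := by
  rw [hits_count_eq, List.countP_congr (fun a _ => iff_of_eq (congrArg (· = true) (point_searxng a)))]
  exact countP_dictItems _ _ [] (List.not_mem_nil)

theorem hits_count_google (l : List (String × String)) :
    (hitsOf l).count "google" = (if keyTruthy l "google_api_key" then 1 else 0)
      + (if keyTruthy l "google_cx" then 1 else 0) := by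
  rw [hits_count_eq, List.countP_congr (fun a _ => iff_of_eq (congrArg (· = true) (point_google a))),
    countP_or_disjoint _ _ _ (by rintro ⟨k, v⟩ ⟨h1, h2⟩; simp [predK] at h1 h2; simp [h1.1] at h2),
    countP_dictItems _ _ [] (List.not_mem_nil), countP_dictItems _ _ [] (List.not_mem_nil)]

theorem hits_count_duck (l : List (String × String)) :
    (hitsOf l).count "duckduckgo" = 0 := by
  rw [hits_count_eq, List.countP_congr (fun a _ => iff_of_eq (congrArg (· = true) (point_duck a)))]
  simp

set_option maxHeartbeats 2000000 in
theorem main_eq (preferred : String) (api_keys : List (String × String)) :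
    build_engine_order_py preferred api_keys = build_engine_order_py_alt preferred api_keys := by
  by_cases hp : preferred ∈ enginePriority
  · cases ht : keyTruthy api_keys "tavily_api_key" <;>
      cases hb : keyTruthy api_keys "bing_api_key" <;>
      cases hg : keyTruthy api_keys "google_api_key" <;>
      cases hc : keyTruthy api_keys "google_cx" <;>
      cases hs : keyTruthy api_keys "searxng_url" <;>
      (simp [enginePriority] at hp;
       rcases hp with h | h | h | h | h <;> subst h <;>
         simp [build_engine_order_py, build_engine_order_py_alt, enginePriority,
               engine_available, needList, List.foldl, List.filter,
               hits_count_tavily, hits_count_bing, hits_count_google, hits_count_searxng,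
               hits_count_duck, ht, hb, hg, hc, hs,
               PySem.List.sorted2, PySem.List.insertBy, PySem.List.index?,
               List.idxOf?, List.findIdx?, List.findIdx?.go] <;>
         (try decide))
  · simp [enginePriority] at hp
    obtain ⟨n1, n2, n3, n4, n5⟩ := hp
    have b1 : ("tavily" == preferred) = false := by
      rw [beq_eq_false_iff_ne]; exact fun e => n1 e.symm
    have b2 : ("bing" == preferred) = false := by
      rw [beq_eq_false_iff_ne]; exact fun e => n2 e.symm
    have b3 : ("google" == preferred) = false := by
      rw [beq_eq_false_iff_ne]; exact fun e => n3 e.symm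
    have b4 : ("searxng" == preferred) = false := by
      rw [beq_eq_false_iff_ne]; exact fun e => n4 e.symm
    have b5 : ("duckduckgo" == preferred) = false := by
      rw [beq_eq_false_iff_ne]; exact fun e => n5 e.symm
    cases ht : keyTruthy api_keys "tavily_api_key" <;>
      cases hb : keyTruthy api_keys "bing_api_key" <;>
      cases hg : keyTruthy api_keys "google_api_key" <;>
      cases hc : keyTruthy api_keys "google_cx" <;>
      cases hs : keyTruthy api_keys "searxng_url" <;>
      (simp [build_engine_order_py, build_engine_order_py_alt, enginePriority,
             engine_available, needList, List.foldl, List.filter,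
             hits_count_tavily, hits_count_bing, hits_count_google, hits_count_searxng,
             hits_count_duck, ht, hb, hg, hc, hs,
             PySem.List.sorted2, PySem.List.insertBy, PySem.List.index?,
             List.idxOf?, List.findIdx?, List.findIdx?.go,
             b1, b2, b3, b4, b5, n1, n2, n3, n4, n5])

-- ===== VERDICT =====
theorem build_engine_order_py_spec : Claim_equal_build_engine_order_py := by
  intro preferred api_keys _
  exact main_eq preferred api_keys
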